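-- pv_equiv track=rewrite | github.com/Seebrasse345/linkedin_auto_apply | apply/wizard_old_donotuse.py | _get_auto_answer
-- ===== SOURCE A (Python) =====
-- from typing import Dict, List, Optional, Tuple, Any
--
-- def _get_auto_answer(field_label: str, options: List[str]) -> str:
--     """Get an auto-generated answer based on field type and options."""
--     # Handles common yes/no questions
--     if len(options) == 2 and 'yes' in options[0].lower() and 'no' in options[1].lower():
--         # For disability questions, prefer "No"
--         if 'disability' in field_label.lower() or 'disabled' in field_label.lower():
--             return "No"
--         # For experience or qualification questions, prefer "Yes"
--         elif any(kw in field_label.lower() for kw in ['experience', 'work', 'skill', 'qualified', 'eligible']):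
--             return "Yes"
--         # For location/commute questions, prefer "Yes"
--         elif any(kw in field_label.lower() for kw in ['commut', 'locat', 'relocat', 'move', 'travel']):
--             return "Yes"
--         # For education questions, prefer "Yes" (having the degree is better than not)
--         elif any(kw in field_label.lower() for kw in ['degree', 'education', 'bachelor', 'master']):
--             return "Yes"
--
--     # For demographic questions
--     if 'gender' in field_label.lower() or 'sex' in field_label.lower():
--         # Look for "prefer not to say"
--         for option in options:
--             if 'prefer not' in option.lower():
--                 return option
--
--     if 'ethnicity' in field_label.lower() or 'race' in field_label.lower():
--         # Look for "prefer not to say" first, then "white"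
--         for option in options:
--             if 'prefer not' in option.lower():
--                 return option
--         for option in options:
--             if 'white' in option.lower():
--                 return option
--
--     if 'veteran' in field_label.lower() or 'military' in field_label.lower():
--         # Default to "No" for veteran status
--         for option in options:
--             if option.lower() == 'no':
--                 return option
--
--     # Default to first option if no special case
--     return options[0] if options else ""
-- ===== SOURCE B (Python) =====
-- def _get_auto_answer(field_label, options):
--     """Single pass over options collecting all candidates, then one back-to-front
--     override chain (lowest-precedence rule first) instead of A's early-return cascade."""
--     lab = field_label.lower()
--
--     # One scan of options: first 'prefer not' option, first 'white' option, first exact 'no'.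
--     pn = wh = no = None
--     for opt in options:
--         ol = opt.lower()
--         if pn is None and 'prefer not' in ol:
--             pn = opt
--         if wh is None and 'white' in ol:
--             wh = opt
--         if no is None and ol == 'no':
--             no = opt
--
--     # Build the answer from the default upward: each later (higher-precedence) stage
--     # overrides whatever the lower stages produced.
--     ans = options[0] if options else ''
--     if ('veteran' in lab or 'military' in lab) and no is not None:
--         ans = no
--     if 'ethnicity' in lab or 'race' in lab:
--         if wh is not None:
--             ans = wh
--         if pn is not None:
--             ans = pn
--     if ('gender' in lab or 'sex' in lab) and pn is not None:
--         ans = pn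
--     if len(options) == 2 and 'yes' in options[0].lower() and 'no' in options[1].lower():
--         if any(k in lab for k in ('degree', 'education', 'bachelor', 'master')):
--             ans = 'Yes'
--         if any(k in lab for k in ('commut', 'locat', 'relocat', 'move', 'travel')):
--             ans = 'Yes'
--         if any(k in lab for k in ('experience', 'work', 'skill', 'qualified', 'eligible')):
--             ans = 'Yes'
--         if any(k in lab for k in ('disability', 'disabled')):
--             ans = 'No'
--     return ans
-- ===== Notes on version B (the rewrite author's own statement) =====
-- stated objective: alternative
-- what changed: Instead of A's early-return cascade where each rule rescans the options, B makes ONE pass over the options collecting all candidate answers (first 'prefer not', first 'white', first exact 'no') and then builds the result back-to-front: starting from the default it applies the stages in reverse precedence order, each firing stage overriding the accumulated answer.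
import Mathlib
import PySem

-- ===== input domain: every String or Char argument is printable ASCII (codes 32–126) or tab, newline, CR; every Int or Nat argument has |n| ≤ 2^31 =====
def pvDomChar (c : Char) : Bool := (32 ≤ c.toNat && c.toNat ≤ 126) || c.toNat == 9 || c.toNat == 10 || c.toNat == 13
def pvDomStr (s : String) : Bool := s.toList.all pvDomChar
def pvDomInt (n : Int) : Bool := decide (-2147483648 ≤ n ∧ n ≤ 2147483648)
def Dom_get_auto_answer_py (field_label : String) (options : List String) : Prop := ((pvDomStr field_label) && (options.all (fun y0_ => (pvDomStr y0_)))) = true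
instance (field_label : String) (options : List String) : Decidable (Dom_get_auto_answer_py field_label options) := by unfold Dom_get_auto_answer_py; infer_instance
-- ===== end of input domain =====

-- B replaces A's early-return cascade of per-rule scans by ONE pass over the options
-- (collecting all candidate answers) followed by a back-to-front override chain
-- (objective: alternative decomposition, same cost).

-- ===== PORT A =====
-- len(options) == 2 and 'yes' in options[0].lower() and 'no' in options[1].lower()
def pvYN (options : List String) : Bool :=
  match options with
  | [o0, o1] => PySem.Str.isIn "yes" (PySem.Str.lower o0) && PySem.Str.isIn "no" (PySem.Str.lower o1)
  | _ => false

-- A's 'for option in options: if sub in option.lower(): return option'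
def pvFirstContaining (sub : String) : List String → Option String
  | [] => none
  | o :: rest => if PySem.Str.isIn sub (PySem.Str.lower o) then some o else pvFirstContaining sub rest

-- A's veteran loop: 'if option.lower() == "no": return option'
def pvFirstEq (w : String) : List String → Option String
  | [] => none
  | o :: rest => if PySem.Str.lower o == w then some o else pvFirstEq w rest

def get_auto_answer_py (field_label : String) (options : List String) : String :=
  let yn : Bool := pvYN options
  if yn && (PySem.Str.isIn "disability" (PySem.Str.lower field_label) || PySem.Str.isIn "disabled" (PySem.Str.lower field_label)) then "No"
  else if yn && (["experience","work","skill","qualified","eligible"].any (fun kw => PySem.Str.isIn kw (PySem.Str.lower field_label))) then "Yes"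
  else if yn && (["commut","locat","relocat","move","travel"].any (fun kw => PySem.Str.isIn kw (PySem.Str.lower field_label))) then "Yes"
  else if yn && (["degree","education","bachelor","master"].any (fun kw => PySem.Str.isIn kw (PySem.Str.lower field_label))) then "Yes"
  else
    -- demographic blocks, each falling through when its loop finds nothing
    let g : Option String :=
      if PySem.Str.isIn "gender" (PySem.Str.lower field_label) || PySem.Str.isIn "sex" (PySem.Str.lower field_label) then
        pvFirstContaining "prefer not" options
      else none
    match g with
    | some o => o
    | none =>
      let e : Option String :=
        if PySem.Str.isIn "ethnicity" (PySem.Str.lower field_label) || PySem.Str.isIn "race" (PySem.Str.lower field_label) then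
          match pvFirstContaining "prefer not" options with
          | some o => some o
          | none => pvFirstContaining "white" options
        else none
      match e with
      | some o => o
      | none =>
        let v : Option String :=
          if PySem.Str.isIn "veteran" (PySem.Str.lower field_label) || PySem.Str.isIn "military" (PySem.Str.lower field_label) then
            pvFirstEq "no" options
          else none
        match v with
        | some o => o
        | none => match options with | [] => "" | o :: _ => o

-- ===== PORT B =====
-- B's single pass over options with a three-candidate accumulator (pn, wh, no)
def pvScan : List String → Option String × Option String × Option String → Option String × Option String × Option String
  | [], s => s
  | o :: rest, (pn, wh, no) =>
    let ol := PySem.Str.lower o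
    pvScan rest
      ((if pn.isNone && PySem.Str.isIn "prefer not" ol then some o else pn),
       (if wh.isNone && PySem.Str.isIn "white" ol then some o else wh),
       (if no.isNone && (ol == "no") then some o else no))

def get_auto_answer_py_alt (field_label : String) (options : List String) : String :=
  let lab := PySem.Str.lower field_label
  let s := pvScan options (none, none, none)
  let pn := s.1; let wh := s.2.1; let no := s.2.2
  -- default, then override from lowest- to highest-precedence stage
  let a0 : String := match options with | [] => "" | o :: _ => o
  let a1 := if (PySem.Str.isIn "veteran" lab || PySem.Str.isIn "military" lab) && no.isSome then no.getD a0 else a0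
  let a2 := if PySem.Str.isIn "ethnicity" lab || PySem.Str.isIn "race" lab then pn.getD (wh.getD a1) else a1
  let a3 := if (PySem.Str.isIn "gender" lab || PySem.Str.isIn "sex" lab) && pn.isSome then pn.getD a2 else a2
  if pvYN options then
    let b1 := if ["degree","education","bachelor","master"].any (fun kw => PySem.Str.isIn kw lab) then "Yes" else a3
    let b2 := if ["commut","locat","relocat","move","travel"].any (fun kw => PySem.Str.isIn kw lab) then "Yes" else b1
    let b3 := if ["experience","work","skill","qualified","eligible"].any (fun kw => PySem.Str.isIn kw lab) then "Yes" else b2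
    if ["disability","disabled"].any (fun kw => PySem.Str.isIn kw lab) then "No" else b3
  else a3

-- ===== PRECONDITION & SPEC =====
def Spec_get_auto_answer_py (field_label : String) (options : List String) (out : String) : Prop := out = get_auto_answer_py_alt field_label options
instance (field_label : String) (options : List String) (out : String) : Decidable (Spec_get_auto_answer_py field_label options out) := by unfold Spec_get_auto_answer_py; infer_instance

-- ===== CLAIM (what is proved, stated in full; the proofs are below) =====
def Claim_equal_get_auto_answer_py : Prop := ∀ (field_label : String) (options : List String), Dom_get_auto_answer_py field_label options → Spec_get_auto_answer_py field_label options (get_auto_answer_py field_label options)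

-- ===== LEMMAS AND PROOFS =====
-- the accumulator pass computes exactly the three first-match searches
theorem pvScan_eq (xs : List String) (pn wh no : Option String) :
    pvScan xs (pn, wh, no) =
      (pn.or (pvFirstContaining "prefer not" xs),
       wh.or (pvFirstContaining "white" xs),
       no.or (pvFirstEq "no" xs)) := by
  induction xs generalizing pn wh no with
  | nil => simp [pvScan, pvFirstContaining, pvFirstEq]
  | cons o rest ih =>
    simp only [pvScan, pvFirstContaining, pvFirstEq, ih]
    cases pn <;> cases wh <;> cases no <;> simp [Option.or] <;> split_ifs <;> simp

-- ===== VERDICT (by name: the statement is the Claim_ definition above) =====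
theorem get_auto_answer_py_spec : Claim_equal_get_auto_answer_py := by
  intro field_label options _
  unfold Spec_get_auto_answer_py get_auto_answer_py get_auto_answer_py_alt
  simp only [pvScan_eq, Option.none_or, List.any_cons, List.any_nil, Bool.or_false]
  generalize PySem.Str.lower field_label = lab
  generalize pvYN options = yn
  generalize (PySem.Str.isIn "disability" lab || PySem.Str.isIn "disabled" lab) = c1
  generalize (PySem.Str.isIn "experience" lab || (PySem.Str.isIn "work" lab || (PySem.Str.isIn "skill" lab || (PySem.Str.isIn "qualified" lab || PySem.Str.isIn "eligible" lab)))) = c2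
  generalize (PySem.Str.isIn "commut" lab || (PySem.Str.isIn "locat" lab || (PySem.Str.isIn "relocat" lab || (PySem.Str.isIn "move" lab || PySem.Str.isIn "travel" lab)))) = c3
  generalize (PySem.Str.isIn "degree" lab || (PySem.Str.isIn "education" lab || (PySem.Str.isIn "bachelor" lab || PySem.Str.isIn "master" lab))) = c4
  generalize (PySem.Str.isIn "gender" lab || PySem.Str.isIn "sex" lab) = cg
  generalize (PySem.Str.isIn "ethnicity" lab || PySem.Str.isIn "race" lab) = ce
  generalize (PySem.Str.isIn "veteran" lab || PySem.Str.isIn "military" lab) = cv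
  generalize pvFirstContaining "prefer not" options = p
  generalize pvFirstContaining "white" options = w
  generalize pvFirstEq "no" options = n
  cases options <;>
    cases yn <;> cases c1 <;> cases c2 <;> cases c3 <;> cases c4 <;> cases cg <;> cases ce <;> cases cv <;>
    cases p <;> cases w <;> cases n <;> rfl
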